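-- pv_equiv track=rewrite | github.com/IWANNAGOTJU/beta_carotene_expert | scripts/kegg_demo.py | parse_kegg_section
-- ===== SOURCE A (Python) =====
-- from typing import List, Dict, Tuple
--
-- def parse_kegg_section(text: str, section: str) -> List[str]:
--     """
--     Extract a SECTION from KEGG flat file.
--     Returns a list of stripped lines belonging to that section.
--     """
--     lines = text.splitlines()
--     collecting = False
--     out = []
--     for line in lines:
--         if line.startswith(section):
--             collecting = True
--             out.append(line[len(section):].strip())
--         elif collecting:
--             if line.startswith(" "):
--                 out.append(line.strip())
--             else:
--                 break
--     # Flatten possible empty items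
--     return [x for x in out if x]
-- ===== SOURCE B (Python) =====
-- def parse_kegg_section(text, section):
--     """
--     Extract a SECTION from KEGG flat file.
--     Returns a list of stripped lines belonging to that section.
--     """
--     lines = text.splitlines()
--     # drop lines until the first one that opens the section
--     while lines and not lines[0].startswith(section):
--         lines = lines[1:]
--     # take the contiguous block belonging to the section
--     block = []
--     for l in lines:
--         if l.startswith(section) or l.startswith(" "):
--             block.append(l)
--         else:
--             break
--     cleaned = [l[len(section):].strip() if l.startswith(section) else l.strip()
--                for l in block]
--     return [x for x in cleaned if x]
-- ===== Notes on version B (the rewrite author's own statement) =====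
-- stated objective: alternative
-- what changed: Replaces the flag-and-break state machine that interleaves transformation with collection by a drop/take/map/filter pipeline: first locate the section, then take the contiguous block, then clean each line, then drop empties.
import Mathlib
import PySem

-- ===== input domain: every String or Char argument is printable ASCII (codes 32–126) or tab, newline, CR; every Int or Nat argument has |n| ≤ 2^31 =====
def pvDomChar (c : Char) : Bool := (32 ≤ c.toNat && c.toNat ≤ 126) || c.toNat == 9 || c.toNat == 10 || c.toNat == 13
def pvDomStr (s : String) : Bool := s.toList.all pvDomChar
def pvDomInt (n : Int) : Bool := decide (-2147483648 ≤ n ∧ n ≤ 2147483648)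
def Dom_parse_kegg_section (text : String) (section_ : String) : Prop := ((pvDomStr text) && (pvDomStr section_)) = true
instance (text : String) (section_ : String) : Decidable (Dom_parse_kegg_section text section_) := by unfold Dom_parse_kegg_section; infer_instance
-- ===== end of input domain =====

-- B replaces A's flag-and-break state machine by a drop/take/map/filter pipeline (alternative decomposition, same cost).

-- ===== PORT A =====
-- line[len(section):].strip()
def pvStripAfter (sec l : String) : String :=
  PySem.Str.strip (PySem.Str.slice l (some (PySem.Str.len sec : Int)) none)

-- A's for-loop with 'collecting' flag and break
def pvLoopA (sec : String) : List String → Bool → List String → List String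
  | [], _, out => out
  | l :: ls, c, out =>
    if PySem.Str.startswith l sec then
      pvLoopA sec ls true (out ++ [pvStripAfter sec l])
    else if c then
      if PySem.Str.startswith l " " then pvLoopA sec ls c (out ++ [PySem.Str.strip l])
      else out
    else pvLoopA sec ls c out

def parse_kegg_section (text : String) (section_ : String) : List String :=
  (pvLoopA section_ (PySem.Str.splitlines text) false []).filter (fun x => x ≠ "")

-- ===== PORT B =====
-- the while-loop dropping lines until the section opener
def pvDropB (sec : String) : List String → List String
  | [] => []
  | l :: ls => if ¬ PySem.Str.startswith l sec then pvDropB sec ls else l :: ls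

-- the for-loop collecting the contiguous block (break on first foreign line)
def pvTakeB (sec : String) : List String → List String
  | [] => []
  | l :: ls =>
    if PySem.Str.startswith l sec || PySem.Str.startswith l " " then l :: pvTakeB sec ls
    else []

-- the cleaning comprehension's per-line expression
def pvClean (sec l : String) : String :=
  if PySem.Str.startswith l sec then
    PySem.Str.strip (PySem.Str.slice l (some (PySem.Str.len sec : Int)) none)
  else PySem.Str.strip l

def parse_kegg_section_alt (text : String) (section_ : String) : List String :=
  (((pvTakeB section_ (pvDropB section_ (PySem.Str.splitlines text))).map
      (pvClean section_)).filter (fun x => x ≠ ""))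

-- ===== PRECONDITION & SPEC =====
def Spec_parse_kegg_section (text : String) (section_ : String) (out : List String) : Prop := out = parse_kegg_section_alt text section_
instance (text : String) (section_ : String) (out : List String) : Decidable (Spec_parse_kegg_section text section_ out) := by unfold Spec_parse_kegg_section; infer_instance

-- ===== CLAIM (what is proved, stated in full; the proofs are below) =====
def Claim_equal_parse_kegg_section : Prop := ∀ (text : String) (section_ : String), Dom_parse_kegg_section text section_ → Spec_parse_kegg_section text section_ (parse_kegg_section text section_)

-- ===== LEMMAS AND PROOFS =====

-- while collecting, A appends exactly the cleaned block lines
theorem pvLoopA_true (sec : String) (ls : List String) (out : List String) :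
    pvLoopA sec ls true out = out ++ (pvTakeB sec ls).map (pvClean sec) := by
  induction ls generalizing out with
  | nil => simp [pvLoopA, pvTakeB]
  | cons l ls ih =>
    by_cases h : PySem.Chars.startswith l.toList sec.toList = true
    · simp [pvLoopA, pvTakeB, h, ih, pvClean, pvStripAfter]
    · by_cases h2 : PySem.Chars.startswith l.toList [' '] = true
      · simp [pvLoopA, pvTakeB, h, h2, ih, pvClean]
      · simp [pvLoopA, pvTakeB, h, h2]

-- before collecting, A skips exactly what pvDropB skips, then collects the block
theorem pvLoopA_false (sec : String) (ls : List String) (out : List String) :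
    pvLoopA sec ls false out
      = out ++ (pvTakeB sec (pvDropB sec ls)).map (pvClean sec) := by
  induction ls generalizing out with
  | nil => simp [pvLoopA, pvDropB, pvTakeB]
  | cons l ls ih =>
    by_cases h : PySem.Chars.startswith l.toList sec.toList = true
    · simp [pvLoopA, pvDropB, pvTakeB, h, pvLoopA_true, pvClean, pvStripAfter]
    · simp [pvLoopA, pvDropB, h, ih]

-- ===== VERDICT (by name: the statement is the Claim_ definition above) =====
theorem parse_kegg_section_spec : Claim_equal_parse_kegg_section := by
  intro text section_ _
  unfold Spec_parse_kegg_section parse_kegg_section parse_kegg_section_alt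
  rw [pvLoopA_false]
  simp
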